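-- pv_equiv track=rewrite | github.com/CodingThrust/problem-reductions | docs/paper/verify-reductions/adversary_partition_kth_largest_m_tuple.py | adv_count_tuples
-- ===== SOURCE A (Python) =====
-- def adv_count_tuples(sets: list[list[int]], bound: int) -> int:
--     """Independent count of m-tuples with sum >= bound."""
--     n = len(sets)
--     count = 0
--     for mask in range(1 << n):
--         s = 0
--         for i in range(n):
--             s += sets[i][(mask >> i) & 1]
--         if s >= bound:
--             count += 1
--     return count
-- ===== SOURCE B (Python) =====
-- def _half_sums(part):
--     if not part:
--         return [0]
--     rest = _half_sums(part[1:])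
--     return [part[0][0] + t for t in rest] + [part[0][1] + t for t in rest]
--
--
-- def adv_count_tuples(sets: list[list[int]], bound: int) -> int:
--     """Independent count of m-tuples with sum >= bound (meet in the middle)."""
--     half = len(sets) // 2
--     left = _half_sums(sets[:half])
--     right = sorted(_half_sums(sets[half:]))
--     total = 0
--     for s in left:
--         t = bound - s
--         lo, hi = 0, len(right)
--         while lo < hi:
--             mid = (lo + hi) // 2
--             if right[mid] < t:
--                 lo = mid + 1
--             else:
--                 hi = mid
--         total += len(right) - lo
--     return total
-- ===== Notes on version B (the rewrite author's own statement) =====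
-- stated objective: faster
-- what changed: Replaces the enumeration of all 2^n bitmasks by meet-in-the-middle: recursively enumerate the 2^(n/2) partial sums of each half, sort one half's sums, and count complements with a hand-rolled binary search.
import Mathlib
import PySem

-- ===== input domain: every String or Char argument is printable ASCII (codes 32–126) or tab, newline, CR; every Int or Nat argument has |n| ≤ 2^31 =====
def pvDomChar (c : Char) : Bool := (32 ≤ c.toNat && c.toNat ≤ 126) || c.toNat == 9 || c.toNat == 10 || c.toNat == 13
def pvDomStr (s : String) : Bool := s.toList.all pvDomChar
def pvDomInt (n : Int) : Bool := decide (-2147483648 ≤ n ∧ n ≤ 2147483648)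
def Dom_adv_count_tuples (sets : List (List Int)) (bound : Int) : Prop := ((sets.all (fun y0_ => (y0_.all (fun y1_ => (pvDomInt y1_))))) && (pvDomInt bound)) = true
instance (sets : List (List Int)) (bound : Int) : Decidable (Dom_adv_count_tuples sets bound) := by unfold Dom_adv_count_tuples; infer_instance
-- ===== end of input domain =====

-- ===== PORT A =====
-- B is a meet-in-the-middle re-implementation of A's full 2^n bitmask enumeration; A raises
-- IndexError when some inner list has length < 2 — those inputs are excluded by Pre_.
-- Port of A: for mask in range(1 << n): s = sum over i of sets[i][(mask >> i) & 1]; count if s >= bound.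
-- ('sets[i]' and 'sets[i][bit]' are in range under Pre_, ported with getD; range(1 << n) over Nat masks.)
def adv_count_tuples (sets : List (List Int)) (bound : Int) : Int :=
  (List.range (1 <<< sets.length)).foldl
    (fun count mask =>
      if bound ≤ (List.range sets.length).foldl
          (fun s i => s + (sets.getD i []).getD ((mask >>> i) &&& 1) 0) 0
      then count + 1 else count) 0

-- ===== PORT B =====
-- _half_sums(part): recursively all 2^|part| sums picking part[i][0] or part[i][1]
-- (part[0][0] / part[0][1] are in range under Pre_, ported with getD).
def pvHalfSums (part : List (List Int)) : List Int :=
  match part with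
  | [] => [0]
  | l :: restPart =>
    let rest := pvHalfSums restPart
    rest.map (fun t => l.getD 0 0 + t) ++ rest.map (fun t => l.getD 1 0 + t)

-- the hand-rolled bisect_left loop of Source B: while lo < hi: mid = (lo+hi)//2; ...
-- (right[mid] is always in range since mid < hi <= len(right), ported with getD; the fuel
-- argument is only a totality guard: hi - lo shrinks every iteration, so fuel = len(right) suffices)
def pvBisect : List Int → Int → Nat → Nat → Nat → Nat
  | _, _, 0, lo, _ => lo
  | right, t, fuel + 1, lo, hi =>
    if lo < hi then
      (if right.getD ((lo + hi) / 2) 0 < t then pvBisect right t fuel ((lo + hi) / 2 + 1) hi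
       else pvBisect right t fuel lo ((lo + hi) / 2))
    else lo

-- sets[:half] / sets[half:] with 0 <= half <= len(sets) are exactly take/drop.
def adv_count_tuples_alt (sets : List (List Int)) (bound : Int) : Int :=
  let half := sets.length / 2
  let left := pvHalfSums (sets.take half)
  let right := PySem.List.sorted (pvHalfSums (sets.drop half)) (fun x => x)
  left.foldl
    (fun total s =>
      total + ((right.length : Int)
        - (pvBisect right (bound - s) right.length 0 right.length : Int))) 0

-- ===== PRECONDITION & SPEC =====
-- Pre_ excludes exactly the inputs where Python A raises IndexError: some inner list has
-- fewer than 2 elements (every inner list is indexed at 0 and at 1 over all masks).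
def Pre_adv_count_tuples (sets : List (List Int)) (bound : Int) : Prop :=
  ∀ l ∈ sets, 2 ≤ l.length
instance (sets : List (List Int)) (bound : Int) : Decidable (Pre_adv_count_tuples sets bound) := by
  unfold Pre_adv_count_tuples; infer_instance

def pvWitness_adv_count_tuples : List (List Int) × Int := ([[0, 1], [2, 3], [-1, 4]], 3)

def Spec_adv_count_tuples (sets : List (List Int)) (bound : Int) (out : Int) : Prop := out = adv_count_tuples_alt sets bound
instance (sets : List (List Int)) (bound : Int) (out : Int) : Decidable (Spec_adv_count_tuples sets bound out) := by unfold Spec_adv_count_tuples; infer_instance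

-- ===== CLAIM (what is proved, stated in full; the proofs are below) =====
def Claim_equal_adv_count_tuples : Prop := ∀ (sets : List (List Int)) (bound : Int), Dom_adv_count_tuples sets bound → Pre_adv_count_tuples sets bound → Spec_adv_count_tuples sets bound (adv_count_tuples sets bound)

-- ===== LEMMAS AND PROOFS =====

-- The common reference point: the recursive count of choice tuples with sum >= b.
def pvN : List (List Int) → Int → Int
  | [], b => if b ≤ 0 then 1 else 0
  | l :: rest, b => pvN rest (b - l.getD 0 0) + pvN rest (b - l.getD 1 0)

-- the sum selected by a bitmask (bit i picks element 0 or 1 of the i-th list)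
def pvMaskSum : List (List Int) → Nat → Int
  | [], _ => 0
  | l :: rest, mask => l.getD (mask &&& 1) 0 + pvMaskSum rest (mask >>> 1)

theorem pv_inner_sum (sets : List (List Int)) (mask : Nat) :
    ((List.range sets.length).map
      (fun i => (sets.getD i []).getD ((mask >>> i) &&& 1) 0)).sum = pvMaskSum sets mask := by
  induction sets generalizing mask with
  | nil => simp [pvMaskSum]
  | cons l rest ih =>
    rw [List.length_cons, List.range_succ_eq_map, List.map_cons, List.map_map, List.sum_cons]
    have htail : ((List.range rest.length).map
        ((fun i => ((l :: rest).getD i []).getD ((mask >>> i) &&& 1) 0) ∘ Nat.succ)).sum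
        = pvMaskSum rest (mask >>> 1) := by
      rw [← ih (mask >>> 1)]
      apply congrArg
      apply List.map_congr_left
      intro i _
      have hsh : mask >>> (i + 1) = (mask >>> 1) >>> i := by
        rw [← Nat.shiftRight_add, Nat.add_comm]
      simp [Function.comp, hsh]
    rw [htail]
    simp [pvMaskSum]

theorem pv_countP_range_two_mul (N : Nat) (p : Nat → Bool) :
    (List.range (2 * N)).countP p
      = (List.range N).countP (fun k => p (2 * k)) + (List.range N).countP (fun k => p (2 * k + 1)) := by
  induction N with
  | zero => simp
  | succ N ih =>
    have h2 : 2 * (N + 1) = (2 * N + 1) + 1 := by omega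
    rw [h2, List.range_succ, List.range_succ, List.countP_append, List.countP_append,
        List.range_succ, List.countP_append, List.countP_append, ih]
    simp only [List.countP_cons, List.countP_nil]
    cases hp : p (2 * N) <;> cases hq : p (2 * N + 1) <;> simp <;> omega

theorem pv_maskSum_even (l : List Int) (rest : List (List Int)) (k : Nat) :
    pvMaskSum (l :: rest) (2 * k) = l.getD 0 0 + pvMaskSum rest k := by
  rw [pvMaskSum]
  have h1 : (2 * k) &&& 1 = 0 := by rw [Nat.and_one_is_mod]; omega
  have h2 : (2 * k) >>> 1 = k := by rw [Nat.shiftRight_one]; omega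
  rw [h1, h2]

theorem pv_maskSum_odd (l : List Int) (rest : List (List Int)) (k : Nat) :
    pvMaskSum (l :: rest) (2 * k + 1) = l.getD 1 0 + pvMaskSum rest k := by
  rw [pvMaskSum]
  have h1 : (2 * k + 1) &&& 1 = 1 := by rw [Nat.and_one_is_mod]; omega
  have h2 : (2 * k + 1) >>> 1 = k := by rw [Nat.shiftRight_one]; omega
  rw [h1, h2]

theorem pv_count_eq_pvN (sets : List (List Int)) (b : Int) :
    (((List.range (2 ^ sets.length)).countP (fun m => decide (b ≤ pvMaskSum sets m)) : Nat) : Int)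
      = pvN sets b := by
  induction sets generalizing b with
  | nil =>
    by_cases hb : b ≤ 0 <;>
      simp [pvMaskSum, pvN, List.range_one, List.countP_nil, hb]
  | cons l rest ih =>
    have hp : 2 ^ (l :: rest).length = 2 * 2 ^ rest.length := by
      rw [List.length_cons, pow_succ]; ring
    rw [hp, pv_countP_range_two_mul, pvN]
    have he : (List.range (2 ^ rest.length)).countP (fun k => decide (b ≤ pvMaskSum (l :: rest) (2 * k)))
        = (List.range (2 ^ rest.length)).countP (fun k => decide (b - l.getD 0 0 ≤ pvMaskSum rest k)) := by
      apply List.countP_congr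
      intro k _
      simp only [pv_maskSum_even, decide_eq_true_eq]
      omega
    have ho : (List.range (2 ^ rest.length)).countP (fun k => decide (b ≤ pvMaskSum (l :: rest) (2 * k + 1)))
        = (List.range (2 ^ rest.length)).countP (fun k => decide (b - l.getD 1 0 ≤ pvMaskSum rest k)) := by
      apply List.countP_congr
      intro k _
      simp only [pv_maskSum_odd, decide_eq_true_eq]
      omega
    rw [he, ho]
    push_cast
    rw [ih, ih]

-- A computes pvN
theorem pv_A_eq_pvN (sets : List (List Int)) (bound : Int) :
    adv_count_tuples sets bound = pvN sets bound := by
  unfold adv_count_tuples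
  have hfun : (fun (count : Int) (mask : Nat) =>
      if bound ≤ (List.range sets.length).foldl
          (fun s i => s + (sets.getD i []).getD ((mask >>> i) &&& 1) 0) 0
      then count + 1 else count)
      = fun count mask => if bound ≤ pvMaskSum sets mask then count + 1 else count := by
    funext count mask
    rw [PySem.List.foldl_add, zero_add, pv_inner_sum]
  rw [hfun, PySem.List.foldl_ite_add_one, Nat.one_shiftLeft, zero_add, pv_count_eq_pvN]

-- pvN of a half equals the count of big elements among its enumerated sums
theorem pv_pvN_eq_countP (part : List (List Int)) (c : Int) :
    pvN part c = (((pvHalfSums part).countP (fun u => decide (c ≤ u)) : Nat) : Int) := by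
  induction part generalizing c with
  | nil =>
    by_cases hc : c ≤ 0 <;>
      simp [pvN, pvHalfSums, List.countP_nil, hc]
  | cons l rest ih =>
    rw [pvN, pvHalfSums]
    simp only [List.countP_append, List.countP_map]
    have h0 : (List.countP ((fun u => decide (c ≤ u)) ∘ (fun t => l.getD 0 0 + t)) (pvHalfSums rest))
        = List.countP (fun u => decide (c - l.getD 0 0 ≤ u)) (pvHalfSums rest) := by
      apply List.countP_congr
      intro t _
      simp only [Function.comp_apply, decide_eq_true_eq]
      omega
    have h1 : (List.countP ((fun u => decide (c ≤ u)) ∘ (fun t => l.getD 1 0 + t)) (pvHalfSums rest))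
        = List.countP (fun u => decide (c - l.getD 1 0 ≤ u)) (pvHalfSums rest) := by
      apply List.countP_congr
      intro t _
      simp only [Function.comp_apply, decide_eq_true_eq]
      omega
    rw [h0, h1, ih, ih]
    push_cast
    ring

-- splitting pvN over an append via the enumerated sums of the first part
theorem pv_pvN_append (p1 p2 : List (List Int)) (b : Int) :
    pvN (p1 ++ p2) b = ((pvHalfSums p1).map (fun s => pvN p2 (b - s))).sum := by
  induction p1 generalizing b with
  | nil => simp [pvHalfSums]
  | cons l rest ih =>
    rw [List.cons_append, pvN, pvHalfSums]
    simp only [List.map_append, List.map_map, List.sum_append]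
    rw [ih, ih]
    congr 1 <;>
    · apply congrArg
      apply List.map_congr_left
      intro t _
      simp only [Function.comp_apply]
      ring_nf

-- invariant-preserving spec of the hand-rolled binary search
theorem pv_bisect_spec (right : List Int) (t : Int)
    (hsorted : List.Pairwise (· ≤ ·) right) :
    ∀ fuel lo hi, hi - lo ≤ fuel → lo ≤ hi → hi ≤ right.length →
    (∀ i (h : i < right.length), i < lo → right[i] < t) →
    (∀ i (h : i < right.length), hi ≤ i → t ≤ right[i]) →
    lo ≤ pvBisect right t fuel lo hi ∧ pvBisect right t fuel lo hi ≤ hi ∧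
    (∀ i (h : i < right.length), i < pvBisect right t fuel lo hi → right[i] < t) ∧
    (∀ i (h : i < right.length), pvBisect right t fuel lo hi ≤ i → t ≤ right[i]) := by
  intro fuel
  induction fuel with
  | zero =>
    intro lo hi hf hle _ hlo hhi
    have heq : lo = hi := by omega
    subst heq
    simp only [pvBisect]
    exact ⟨le_refl _, le_refl _, hlo, hhi⟩
  | succ fuel ih =>
    intro lo hi hf hle hlen hlo hhi
    simp only [pvBisect]
    by_cases h : lo < hi
    · rw [if_pos h]
      have hmid1 : lo ≤ (lo + hi) / 2 := by omega
      have hmid2 : (lo + hi) / 2 < hi := by omega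
      have hmidlen : (lo + hi) / 2 < right.length := by omega
      have hget : right.getD ((lo + hi) / 2) 0 = right[(lo + hi) / 2] :=
        List.getD_eq_getElem right 0 hmidlen
      rw [hget]
      have hpw := List.pairwise_iff_getElem.mp hsorted
      by_cases hcmp : right[(lo + hi) / 2] < t
      · rw [if_pos hcmp]
        have hlo' : ∀ i (h : i < right.length), i < (lo + hi) / 2 + 1 → right[i] < t := by
          intro i hi2 hilt
          by_cases hi3 : i < lo
          · exact hlo i hi2 hi3
          · by_cases hieq : i = (lo + hi) / 2
            · subst hieq; exact hcmp
            · have hlt : i < (lo + hi) / 2 := by omega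
              exact lt_of_le_of_lt (hpw i ((lo + hi) / 2) hi2 hmidlen hlt) hcmp
        obtain ⟨hb1, hb2, hb3, hb4⟩ :=
          ih ((lo + hi) / 2 + 1) hi (by omega) (by omega) hlen hlo' hhi
        exact ⟨by omega, hb2, hb3, hb4⟩
      · rw [if_neg hcmp]
        have hhi' : ∀ i (h : i < right.length), (lo + hi) / 2 ≤ i → t ≤ right[i] := by
          intro i hi2 hige
          by_cases hieq : i = (lo + hi) / 2
          · subst hieq; omega
          · have hgt : (lo + hi) / 2 < i := by omega
            exact le_trans (le_of_not_gt hcmp) (hpw ((lo + hi) / 2) i hmidlen hi2 hgt)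
        obtain ⟨hb1, hb2, hb3, hb4⟩ :=
          ih lo ((lo + hi) / 2) (by omega) (by omega) (by omega) hlo hhi'
        exact ⟨hb1, by omega, hb3, hb4⟩
    · rw [if_neg h]
      have heq : lo = hi := by omega
      subst heq
      exact ⟨le_refl _, le_refl _, hlo, hhi⟩

-- a positional split determines the count of elements >= t
theorem pv_countP_of_split (r : List Int) (t : Int) (k : Nat) (hk : k ≤ r.length)
    (hlt : ∀ i (h : i < r.length), i < k → r[i] < t)
    (hge : ∀ i (h : i < r.length), k ≤ i → t ≤ r[i]) :
    r.countP (fun u => decide (t ≤ u)) = r.length - k := by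
  have hsplit : r.countP (fun u => decide (t ≤ u))
      = (r.take k).countP (fun u => decide (t ≤ u)) + (r.drop k).countP (fun u => decide (t ≤ u)) := by
    conv_lhs => rw [← List.take_append_drop k r]
    rw [List.countP_append]
  have h1 : (r.take k).countP (fun u => decide (t ≤ u)) = 0 := by
    rw [List.countP_eq_zero]
    intro x hx
    rw [List.mem_iff_getElem] at hx
    obtain ⟨i, hi, hxe⟩ := hx
    have hlen : (r.take k).length = min k r.length := List.length_take
    have hi2 : i < k := by omega
    have hi3 : i < r.length := by omega
    have hx2 : (r.take k)[i] = r[i] := List.getElem_take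
    rw [hx2] at hxe
    subst hxe
    simp only [decide_eq_true_eq, not_le]
    exact hlt i hi3 hi2
  have h2 : (r.drop k).countP (fun u => decide (t ≤ u)) = (r.drop k).length := by
    rw [List.countP_eq_length]
    intro x hx
    rw [List.mem_iff_getElem] at hx
    obtain ⟨i, hi, hxe⟩ := hx
    have hlen : (r.drop k).length = r.length - k := List.length_drop
    have hi2 : k + i < r.length := by omega
    have hx2 : (r.drop k)[i] = r[k + i] := List.getElem_drop
    rw [hx2] at hxe
    subst hxe
    simp only [decide_eq_true_eq]
    exact hge (k + i) hi2 (by omega)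
  rw [hsplit, h1, h2, List.length_drop]
  omega

-- B computes pvN
theorem pv_B_eq_pvN (sets : List (List Int)) (bound : Int) :
    adv_count_tuples_alt sets bound = pvN sets bound := by
  unfold adv_count_tuples_alt
  simp only []
  set half := sets.length / 2 with hhalf
  set right := PySem.List.sorted (pvHalfSums (sets.drop half)) (fun x => x) with hright
  have hsorted : List.Pairwise (· ≤ ·) right := by
    have := PySem.List.sorted_pairwise (pvHalfSums (sets.drop half)) (fun x => x)
    simpa using this
  have hperm : right.Perm (pvHalfSums (sets.drop half)) :=
    PySem.List.sorted_perm _ _ _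
  rw [PySem.List.foldl_add, zero_add]
  have hmap : (pvHalfSums (sets.take half)).map
        (fun s => (right.length : Int)
          - (pvBisect right (bound - s) right.length 0 right.length : Int))
      = (pvHalfSums (sets.take half)).map (fun s => pvN (sets.drop half) (bound - s)) := by
    apply List.map_congr_left
    intro s _
    obtain ⟨hk1, hk2, hklt, hkge⟩ :=
      pv_bisect_spec right (bound - s) hsorted right.length 0 right.length (by omega) (by omega)
        (le_refl _) (by intro i h hi0; omega) (by intro i h hge; omega)
    have hcount := pv_countP_of_split right (bound - s)
      (pvBisect right (bound - s) right.length 0 right.length) hk2 hklt hkge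
    have hperm_count : (pvHalfSums (sets.drop half)).countP (fun u => decide (bound - s ≤ u))
        = right.countP (fun u => decide (bound - s ≤ u)) := (hperm.countP_eq _).symm
    rw [pv_pvN_eq_countP, hperm_count, hcount]
    have hcast : ((right.length - pvBisect right (bound - s) right.length 0 right.length : Nat) : Int)
        = (right.length : Int)
          - (pvBisect right (bound - s) right.length 0 right.length : Int) := by
      omega
    rw [hcast]
  rw [hmap]
  have happ := pv_pvN_append (sets.take half) (sets.drop half) bound
  rw [List.take_append_drop] at happ
  rw [← happ]

-- ===== VERDICT (by name: the statement is the Claim_ definition above) =====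
theorem adv_count_tuples_spec : Claim_equal_adv_count_tuples := by
  intro sets bound _ _
  unfold Spec_adv_count_tuples
  rw [pv_A_eq_pvN, pv_B_eq_pvN]
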